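-- pv_equiv track=rewrite | github.com/Codium-ai/cover-agent | cover_agent/lsp_logic/multilspy/multilspy_utils.py | get_line_col_from_index
-- ===== SOURCE A (Python) =====
-- from typing import Tuple
--
-- def get_line_col_from_index(text: str, index: int) -> Tuple[int, int]:
--     """
--     Returns the zero-indexed line and column number of the given index in the given text
--     """
--     l = 0
--     c = 0
--     idx = 0
--     while idx < index:
--         if text[idx] == '\n':
--             l += 1
--             c = 0
--         else:
--             c += 1
--         idx += 1
--
--     return l, c
-- ===== SOURCE B (Python) =====
-- from typing import Tuple
--
-- def get_line_col_from_index(text: str, index: int) -> Tuple[int, int]: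
--     """
--     Returns the zero-indexed line and column number of the given index in the given text
--     """
--     i = max(0, index)
--     prefix = text[:i]
--     line = prefix.count("\n")
--     col = i - (prefix.rfind("\n") + 1)
--     return line, col
-- ===== Notes on version B (the rewrite author's own statement) =====
-- stated objective: idiomatic
-- what changed: Replaced the per-character while loop with str.count/str.rfind on the prefix text[:index]: the line is the number of newlines before index and the column is the distance to the last newline (rfind's -1 making column = index when there is none).
import Mathlib
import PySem

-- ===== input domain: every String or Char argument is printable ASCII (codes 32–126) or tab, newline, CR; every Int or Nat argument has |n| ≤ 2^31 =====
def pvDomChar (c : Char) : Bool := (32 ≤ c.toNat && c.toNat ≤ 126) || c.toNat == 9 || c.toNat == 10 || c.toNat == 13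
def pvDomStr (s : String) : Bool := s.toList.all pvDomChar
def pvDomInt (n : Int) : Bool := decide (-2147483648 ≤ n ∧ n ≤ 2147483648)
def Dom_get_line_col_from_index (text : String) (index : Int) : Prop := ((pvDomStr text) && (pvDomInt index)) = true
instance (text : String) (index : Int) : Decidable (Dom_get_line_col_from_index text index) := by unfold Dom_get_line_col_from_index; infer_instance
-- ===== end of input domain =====

-- B replaces A's per-character while loop by count/rfind on the prefix text[:index] (same values; a different decomposition).

-- ===== PORT A =====
-- A's while loop: idx runs 0,1,…,index-1, reading text[idx] each step.
-- `none` from pyGet? is Python's IndexError (A raises there); those inputs are excluded by Pre_ below.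
def get_line_col_from_index (text : String) (index : Int) : Int × Int :=
  (PySem.List.pyRange 0 index 1).foldl
    (fun (lc : Int × Int) idx =>
      match PySem.List.pyGet? text.toList idx with
      | some ch => if ch = '\n' then (lc.1 + 1, 0) else (lc.1, lc.2 + 1)
      | none => lc)
    (0, 0)

-- ===== PORT B =====
def get_line_col_from_index_alt (text : String) (index : Int) : Int × Int :=
  let i : Int := max 0 index
  let pre := PySem.Str.slice text none (some i)
  let line : Int := (PySem.Str.count pre "\n" : Int)
  let col : Int := i - (PySem.Str.rfind pre "\n" + 1)
  (line, col)

-- ===== PRECONDITION & SPEC =====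
-- A raises IndexError exactly when index > len(text) (the loop reaches text[len(text)]); Pre_ excludes only those.
def Pre_get_line_col_from_index (text : String) (index : Int) : Prop :=
  index ≤ (text.toList.length : Int)
instance (text : String) (index : Int) : Decidable (Pre_get_line_col_from_index text index) := by
  unfold Pre_get_line_col_from_index; infer_instance

def pvWitness_get_line_col_from_index : String × Int := ("ab\ncd", 4)

def Spec_get_line_col_from_index (text : String) (index : Int) (out : Int × Int) : Prop := out = get_line_col_from_index_alt text index
instance (text : String) (index : Int) (out : Int × Int) : Decidable (Spec_get_line_col_from_index text index out) := by unfold Spec_get_line_col_from_index; infer_instance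

-- ===== CLAIM (what is proved, stated in full; the proofs are below) =====
def Claim_equal_get_line_col_from_index : Prop := ∀ (text : String) (index : Int), Dom_get_line_col_from_index text index → Pre_get_line_col_from_index text index → Spec_get_line_col_from_index text index (get_line_col_from_index text index)

-- ===== LEMMAS AND PROOFS =====

-- count.go with the one-character needle ['\n'] is List.count '\n'.
theorem pv_count_go_nl (fuel : Nat) : ∀ (t : List Char) (acc : Nat), t.length ≤ fuel →
    PySem.Chars.count.go ['\n'] fuel t acc = acc + t.count '\n' := by
  induction fuel with
  | zero =>
    intro t acc h
    have : t = [] := List.eq_nil_of_length_eq_zero (Nat.le_zero.mp h)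
    subst this; simp [PySem.Chars.count.go]
  | succ m ih =>
    intro t acc h
    cases t with
    | nil => simp [PySem.Chars.count.go]
    | cons c t' =>
      have hle : t'.length ≤ m := by simpa using h
      by_cases hc : c = '\n'
      · subst hc
        rw [show PySem.Chars.count.go ['\n'] (m+1) ('\n' :: t') acc
              = PySem.Chars.count.go ['\n'] m t' (acc + 1) by
            simp [PySem.Chars.count.go, List.isPrefixOf]]
        rw [ih t' (acc + 1) hle]
        simp
        omega
      · rw [show PySem.Chars.count.go ['\n'] (m+1) (c :: t') acc
              = PySem.Chars.count.go ['\n'] m t' acc by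
            simp [PySem.Chars.count.go, List.isPrefixOf, Ne.symm hc]]
        rw [ih t' acc hle]
        simp [hc]

theorem pv_count_nl (t : List Char) : PySem.Chars.count t ['\n'] = t.count '\n' := by
  have := pv_count_go_nl t.length t 0 (le_refl _)
  simpa [PySem.Chars.count] using this

-- rfind.go over t ++ [c] agrees with rfind.go over t at search positions ≤ t.length, when c ≠ '\n'.
theorem pv_rfind_go_ne (t : List Char) (c : Char) (hc : c ≠ '\n') :
    ∀ j, j ≤ t.length →
      PySem.Chars.rfind.go (t ++ [c]) ['\n'] j = PySem.Chars.rfind.go t ['\n'] j := by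
  intro j
  induction j with
  | zero =>
    intro _
    cases t with
    | nil => simp [PySem.Chars.rfind.go, List.isPrefixOf, Ne.symm hc]
    | cons h t' => simp [PySem.Chars.rfind.go, List.isPrefixOf]
  | succ m ih =>
    intro hle
    have hm : m ≤ t.length := Nat.le_of_succ_le hle
    have hdrop : List.drop (m + 1) (t ++ [c]) = List.drop (m + 1) t ++ [c] := by
      simp [hle, List.drop_append_of_le_length]
    rw [show PySem.Chars.rfind.go (t ++ [c]) ['\n'] (m+1)
          = if List.isPrefixOf ['\n'] (List.drop (m + 1) (t ++ [c])) then ((m : Int) + 1)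
            else PySem.Chars.rfind.go (t ++ [c]) ['\n'] m by
        simp [PySem.Chars.rfind.go]]
    rw [show PySem.Chars.rfind.go t ['\n'] (m+1)
          = if List.isPrefixOf ['\n'] (List.drop (m + 1) t) then ((m : Int) + 1)
            else PySem.Chars.rfind.go t ['\n'] m by
        simp [PySem.Chars.rfind.go]]
    have hpref : List.isPrefixOf ['\n'] (List.drop (m + 1) (t ++ [c]))
               = List.isPrefixOf ['\n'] (List.drop (m + 1) t) := by
      rw [hdrop]
      cases hd : List.drop (m + 1) t with
      | nil => simp [List.isPrefixOf, Ne.symm hc]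
      | cons x xs => simp [List.isPrefixOf]
    rw [hpref]
    split_ifs with h
    · rfl
    · exact ih hm

-- Appending a non-newline char does not change rfind '\n'.
theorem pv_rfind_append_ne (t : List Char) (c : Char) (hc : c ≠ '\n') :
    PySem.Chars.rfind (t ++ [c]) ['\n'] = PySem.Chars.rfind t ['\n'] := by
  unfold PySem.Chars.rfind
  have hl : (t ++ [c]).length = t.length + 1 := by simp
  rw [hl]
  rw [show PySem.Chars.rfind.go (t ++ [c]) ['\n'] (t.length + 1)
        = if List.isPrefixOf ['\n'] (List.drop (t.length + 1) (t ++ [c])) then ((t.length : Int) + 1)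
          else PySem.Chars.rfind.go (t ++ [c]) ['\n'] t.length by
      simp [PySem.Chars.rfind.go]]
  have : List.drop (t.length + 1) (t ++ [c]) = [] := by
    apply List.drop_eq_nil_of_le; simp
  rw [this]
  rw [if_neg (by simp [List.isPrefixOf])]
  exact pv_rfind_go_ne t c hc t.length (le_refl _)

-- Appending a newline makes rfind '\n' point at it.
theorem pv_rfind_append_nl (t : List Char) :
    PySem.Chars.rfind (t ++ ['\n']) ['\n'] = (t.length : Int) := by
  unfold PySem.Chars.rfind
  have hl : (t ++ ['\n']).length = t.length + 1 := by simp
  rw [hl]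
  cases ht : t.length with
  | zero =>
    have : t = [] := List.eq_nil_of_length_eq_zero ht
    subst this
    simp [PySem.Chars.rfind.go, List.isPrefixOf]
  | succ m =>
    rw [show PySem.Chars.rfind.go (t ++ ['\n']) ['\n'] (m + 1 + 1)
          = if List.isPrefixOf ['\n'] (List.drop (m + 1 + 1) (t ++ ['\n'])) then ((m : Int) + 1 + 1)
            else PySem.Chars.rfind.go (t ++ ['\n']) ['\n'] (m + 1) by
        simp [PySem.Chars.rfind.go]]
    have h0 : List.drop (m + 1 + 1) (t ++ ['\n']) = [] := by
      apply List.drop_eq_nil_of_le; simp [ht]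
    rw [h0]
    rw [if_neg (by simp [List.isPrefixOf])]
    rw [show PySem.Chars.rfind.go (t ++ ['\n']) ['\n'] (m + 1)
          = if List.isPrefixOf ['\n'] (List.drop (m + 1) (t ++ ['\n'])) then ((m : Int) + 1)
            else PySem.Chars.rfind.go (t ++ ['\n']) ['\n'] m by
        simp [PySem.Chars.rfind.go]]
    have h1 : List.drop (m + 1) (t ++ ['\n']) = ['\n'] := by
      have : m + 1 = t.length := ht.symm
      rw [this, List.drop_append]
      simp
    rw [h1]
    simp [List.isPrefixOf]

-- the value B computes from the first n characters
def pvValB (cs : List Char) (n : Nat) : Int × Int :=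
  (((cs.take n).count '\n' : Int), (n : Int) - (PySem.Chars.rfind (cs.take n) ['\n'] + 1))

-- A's fold over range(0, n) computes pvValB, for n ≤ |cs|.
theorem pv_foldA_eq (cs : List Char) (n : Nat) (h : n ≤ cs.length) :
    (PySem.List.pyRange 0 (n : Int) 1).foldl
      (fun (lc : Int × Int) idx =>
        match PySem.List.pyGet? cs idx with
        | some ch => if ch = '\n' then (lc.1 + 1, 0) else (lc.1, lc.2 + 1)
        | none => lc)
      (0, 0) = pvValB cs n := by
  induction n with
  | zero =>
    simp [PySem.List.pyRange_one_eq_nil, pvValB, PySem.Chars.rfind, PySem.Chars.rfind.go,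
      List.isPrefixOf]
  | succ m ih =>
    have hm : m ≤ cs.length := Nat.le_of_succ_le h
    have hmc : (m : Int) < cs.length := by exact_mod_cast Nat.lt_of_succ_le h
    rw [show ((m + 1 : Nat) : Int) = (m : Int) + 1 by push_cast; ring]
    rw [PySem.List.pyRange_one_succ_right (by positivity)]
    rw [List.foldl_append]
    rw [ih hm]
    have hget : PySem.List.pyGet? cs (m : Int) = some cs[m] := by
      rw [PySem.List.pyGet?_natCast]
      exact List.getElem?_eq_getElem (Nat.lt_of_succ_le h)
    have htake : cs.take (m + 1) = cs.take m ++ [cs[m]] := by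
      rw [List.take_add_one]
      simp [List.getElem?_eq_getElem (Nat.lt_of_succ_le h)]
    simp only [List.foldl_cons, List.foldl_nil, hget]
    have hlt : (cs.take m).length = m := List.length_take_of_le hm
    by_cases hc : cs[m] = '\n'
    · rw [if_pos hc]
      unfold pvValB
      rw [htake, hc, pv_rfind_append_nl, hlt]
      refine Prod.ext ?_ ?_
      · simp [List.count_append]
      · push_cast; ring
    · rw [if_neg hc]
      unfold pvValB
      refine Prod.ext ?_ ?_
      · rw [htake, List.count_append]
        have h1 : List.count '\n' [cs[m]] = 0 := by
          simp [hc]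
        omega
      · rw [htake]
        simp only [pv_rfind_append_ne _ _ hc]
        push_cast; ring

-- ===== VERDICT (by name: the statement is the Claim_ definition above) =====
theorem get_line_col_from_index_spec : Claim_equal_get_line_col_from_index := by
  intro text index _ hpre
  unfold Spec_get_line_col_from_index get_line_col_from_index get_line_col_from_index_alt
  by_cases hneg : index ≤ 0
  · rw [PySem.List.pyRange_one_eq_nil hneg]
    have hmax : max 0 index = 0 := by omega
    simp [hmax, PySem.Chars.rfind, PySem.Chars.rfind.go, PySem.Chars.count, List.isPrefixOf,
      PySem.Str.toList_slice, PySem.List.slice_to text.toList (le_refl (0:Int))]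
  · have h0 : 0 ≤ index := by omega
    have hn : ((index.toNat : Nat) : Int) = index := by omega
    have hle : index.toNat ≤ text.toList.length := by
      unfold Pre_get_line_col_from_index at hpre; omega
    rw [← hn]
    rw [pv_foldA_eq text.toList index.toNat hle]
    have hmax : max 0 ((index.toNat : Nat) : Int) = ((index.toNat : Nat) : Int) :=
      max_eq_right (by positivity)
    simp only [hmax]
    have hslice : (PySem.Str.slice text none (some ((index.toNat : Nat) : Int))).toList
        = text.toList.take index.toNat := by
      rw [PySem.Str.toList_slice, PySem.Chars.slice_eq_listSlice,
        PySem.List.slice_to text.toList (by positivity : (0:Int) ≤ ((index.toNat : Nat) : Int)),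
        Int.toNat_natCast]
    unfold pvValB
    refine Prod.ext ?_ ?_
    · simp only [PySem.Str.count_eq, hslice,
        show ("\n" : String).toList = ['\n'] from rfl]
      rw [pv_count_nl]
    · simp only [PySem.Str.rfind_eq, hslice,
        show ("\n" : String).toList = ['\n'] from rfl]
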